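-- pv_equiv track=rewrite | github.com/akneni/pygrab | pygrab/autosession.py | gen_partition
-- ===== SOURCE A (Python) =====
-- def gen_partition(grouped_urls:dict[str:list[str]], cutoff:int, batch_size:int, req_multiple:int) -> list[tuple]:
--     res = []
--
--     last_domain = next(reversed(grouped_urls))
--     counter = 0
--     domain_iter = iter(grouped_urls)
--     curr_domain = next(domain_iter)
--     while 1:
--         if len(grouped_urls[curr_domain]) > cutoff:
--             res.append(
--                 (counter, batch_size*req_multiple, curr_domain)
--             )
--             counter += batch_size*req_multiple
--         else:
--             res.append(
--                 (counter, batch_size, curr_domain)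
--             )
--             counter += batch_size
--
--         if counter >= len(grouped_urls[curr_domain]):
--             if curr_domain == last_domain:
--                 break
--             curr_domain = next(domain_iter)
--             counter = 0
--     return res
-- ===== SOURCE B (Python) =====
-- def gen_partition(grouped_urls: dict, cutoff: int, batch_size: int, req_multiple: int) -> list:
--     # Stage 1: one spec per domain -- (domain, step, number of batches), the count
--     # obtained in closed form by ceiling division instead of stepping a counter.
--     specs = []
--     for domain, urls in grouped_urls.items():
--         step = batch_size * req_multiple if len(urls) > cutoff else batch_size
--         specs.append((domain, step, max(-(-len(urls) // step), 1)))
--     # Stage 2: expand every spec, computing each offset by multiplication.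
--     return [(i * step, step, domain) for domain, step, n in specs for i in range(n)]
-- ===== Notes on version B (the rewrite author's own statement) =====
-- stated objective: alternative
-- what changed: Replaces A's stepping counter/iterator state machine by two staged passes: a first pass computes for each domain a (domain, step, count) spec with the batch count obtained in closed form by ceiling division max(-(-len//step),1), and a second pass expands the specs, producing each offset by multiplication i*step instead of incrementing an accumulator.
-- outside the precondition, e.g. on gen_partition({'a': []}, 0, 0, 1): A returns [(0, 0, 'a')], B raises ZeroDivisionError
import Mathlib
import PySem

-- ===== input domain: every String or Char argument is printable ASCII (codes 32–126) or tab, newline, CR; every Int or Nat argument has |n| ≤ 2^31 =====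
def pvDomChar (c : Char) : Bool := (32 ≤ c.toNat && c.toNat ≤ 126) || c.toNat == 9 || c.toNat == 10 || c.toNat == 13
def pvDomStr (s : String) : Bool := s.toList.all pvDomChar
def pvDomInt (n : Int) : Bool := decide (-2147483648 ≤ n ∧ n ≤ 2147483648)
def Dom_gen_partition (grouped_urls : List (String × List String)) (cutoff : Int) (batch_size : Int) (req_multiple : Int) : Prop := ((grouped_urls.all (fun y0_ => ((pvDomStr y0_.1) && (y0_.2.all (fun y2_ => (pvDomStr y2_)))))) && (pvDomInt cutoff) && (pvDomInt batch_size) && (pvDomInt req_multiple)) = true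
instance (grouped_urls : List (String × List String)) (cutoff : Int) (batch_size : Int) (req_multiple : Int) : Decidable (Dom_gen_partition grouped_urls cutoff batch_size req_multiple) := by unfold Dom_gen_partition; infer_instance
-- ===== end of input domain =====

-- B replaces A's stepping counter/iterator state machine by two staged passes: a spec pass with a
-- closed-form ceiling-division batch count per domain, then one expansion producing offsets by
-- multiplication; objective: alternative.

-- ===== PORT A =====
-- dict lookup grouped_urls[curr]: first match in the association list (keys are unique under Pre_)
def pvLookup (g : List (String × List String)) (k : String) : List String :=
  ((g.find? (fun p => p.1 == k)).map Prod.snd).getD []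

-- A's while-loop; state = (domain iterator, current domain, counter, res).  The final 'else'
-- branch is a totality guard only: there Python's loop never terminates (counter stops growing),
-- and such inputs are excluded by Pre_gen_partition.
def genA_loop (g : List (String × List String)) (cutoff bs rm : Int) (last : String)
    (it : List String) (curr : String) (counter : Int)
    (res : List (Int × Int × String)) : List (Int × Int × String) :=
  let step := if ((pvLookup g curr).length : Int) > cutoff then bs * rm else bs
  if h1 : counter + step ≥ ((pvLookup g curr).length : Int) then
    if curr == last then res ++ [(counter, step, curr)]
    else
      match it with
      | [] => res ++ [(counter, step, curr)]          -- next() would raise StopIteration; unreachable for a dict's key list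
      | k :: it' => genA_loop g cutoff bs rm last it' k 0 (res ++ [(counter, step, curr)])
  else
    if h2 : 0 < step then genA_loop g cutoff bs rm last it curr (counter + step) (res ++ [(counter, step, curr)])
    else res ++ [(counter, step, curr)]               -- totality guard (Python diverges here; outside Pre_)
termination_by (it.length, (((pvLookup g curr).length : Int) - counter).toNat)
decreasing_by
  · exact Prod.Lex.left _ _ (by simp)
  · exact Prod.Lex.right _ (by omega)

def gen_partition (grouped_urls : List (String × List String)) (cutoff : Int) (batch_size : Int) (req_multiple : Int) : List (Int × Int × String) :=
  if grouped_urls.isEmpty then []                     -- next(reversed({})) raises StopIteration; excluded by Pre_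
  else
    genA_loop grouped_urls cutoff batch_size req_multiple
      ((grouped_urls.map Prod.fst).getLast!)          -- last_domain = next(reversed(grouped_urls))
      ((grouped_urls.map Prod.fst).tail)              -- domain_iter after the first next()
      ((grouped_urls.map Prod.fst).head!)             -- curr_domain = next(domain_iter)
      0 []

-- ===== PORT B =====
-- stage 1: specs = [(domain, step, max(-(-len(urls)//step), 1)) …]; stage 2: flat expansion
def gen_partition_alt (grouped_urls : List (String × List String)) (cutoff : Int) (batch_size : Int) (req_multiple : Int) : List (Int × Int × String) :=
  let specs := grouped_urls.foldl
    (fun acc p =>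
      let step := if ((p.2.length : Int) > cutoff) then batch_size * req_multiple else batch_size
      acc ++ [(p.1, step, max (-(PySem.Int.floordiv (-(p.2.length : Int)) step)) 1)])
    []
  specs.flatMap (fun q => (PySem.List.pyRange 0 q.2.2 1).map (fun i => (i * q.2.1, q.2.1, q.1)))

-- ===== PRECONDITION & SPEC =====
-- Pre_ excludes: the empty dict (A raises StopIteration); duplicate keys (the association list
-- then does not encode a Python dict); and any domain whose effective step is ≤ 0, where A loops
-- forever — except that when such a domain's url list is empty and its step is exactly 0, A still
-- returns a degenerate (0, 0, domain) tuple while B's ceiling division by 0 raises ZeroDivisionError.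
def Pre_gen_partition (grouped_urls : List (String × List String)) (cutoff : Int) (batch_size : Int) (req_multiple : Int) : Prop :=
  grouped_urls ≠ [] ∧ (grouped_urls.map Prod.fst).Nodup ∧
    ∀ p ∈ grouped_urls, 0 < (if ((p.2.length : Int) > cutoff) then batch_size * req_multiple else batch_size)
instance (grouped_urls : List (String × List String)) (cutoff : Int) (batch_size : Int) (req_multiple : Int) : Decidable (Pre_gen_partition grouped_urls cutoff batch_size req_multiple) := by unfold Pre_gen_partition; infer_instance

def pvWitness_gen_partition : (List (String × List String)) × Int × Int × Int :=
  ([("a", ["u1", "u2", "u3"]), ("b", ["v"])], 2, 2, 3)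

def Spec_gen_partition (grouped_urls : List (String × List String)) (cutoff : Int) (batch_size : Int) (req_multiple : Int) (out : List (Int × Int × String)) : Prop := out = gen_partition_alt grouped_urls cutoff batch_size req_multiple
instance (grouped_urls : List (String × List String)) (cutoff : Int) (batch_size : Int) (req_multiple : Int) (out : List (Int × Int × String)) : Decidable (Spec_gen_partition grouped_urls cutoff batch_size req_multiple out) := by unfold Spec_gen_partition; infer_instance

-- ===== CLAIM (what is proved, stated in full; the proofs are below) =====
def Claim_equal_gen_partition : Prop := ∀ (grouped_urls : List (String × List String)) (cutoff : Int) (batch_size : Int) (req_multiple : Int), Dom_gen_partition grouped_urls cutoff batch_size req_multiple → Pre_gen_partition grouped_urls cutoff batch_size req_multiple → Spec_gen_partition grouped_urls cutoff batch_size req_multiple (gen_partition grouped_urls cutoff batch_size req_multiple)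
-- ===== LEMMAS AND PROOFS =====

def pvStep (cutoff bs rm : Int) (urls : List String) : Int :=
  if (urls.length : Int) > cutoff then bs * rm else bs

def pvSegTuples (cutoff bs rm : Int) (curr : String) (urls : List String) (counter : Int) : List (Int × Int × String) :=
  (PySem.List.pyRange counter (max (urls.length : Int) (counter + 1)) (pvStep cutoff bs rm urls)).map
    (fun o => (o, pvStep cutoff bs rm urls, curr))

lemma pyRange_pos_nil (a b s : Int) (hs : 0 < s) (hab : b ≤ a) : PySem.List.pyRange a b s = [] := by
  rw [PySem.List.pyRange_of_pos _ _ hs]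
  simp [show ¬ a < b by omega]

lemma pyRange_pos_cons (a b s : Int) (hs : 0 < s) (hab : a < b) :
    PySem.List.pyRange a b s = a :: PySem.List.pyRange (a + s) b s := by
  rw [PySem.List.pyRange_of_pos _ _ hs, PySem.List.pyRange_of_pos _ _ hs]
  by_cases h : a + s < b
  · have hnum : b - a + s - 1 = (b - (a + s) + s - 1) + 1 * s := by ring
    have hdiv : (b - a + s - 1) / s = (b - (a + s) + s - 1) / s + 1 := by
      rw [hnum, Int.add_mul_ediv_right _ _ hs.ne']
    have hm : 0 ≤ (b - (a + s) + s - 1) / s := Int.ediv_nonneg (by omega) hs.le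
    simp only [if_pos hab, if_pos h, hdiv]
    have ht : ((b - (a + s) + s - 1) / s + 1).toNat = ((b - (a + s) + s - 1) / s).toNat + 1 := by omega
    rw [ht, List.range_succ_eq_map]
    simp only [List.map_cons, List.map_map]
    refine List.cons_eq_cons.mpr ⟨by push_cast; ring, ?_⟩
    apply List.map_congr_left
    intro k _
    simp only [Function.comp_apply]
    push_cast
    ring
  · have hr0 : (b - a - 1) / s = 0 := Int.ediv_eq_zero_of_lt (by omega) (by omega)
    have hnum : b - a + s - 1 = (b - a - 1) + 1 * s := by ring
    have hdiv : (b - a + s - 1) / s = 1 := by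
      rw [hnum, Int.add_mul_ediv_right _ _ hs.ne', hr0]
      norm_num
    simp only [if_pos hab, if_neg h, hdiv]
    norm_num

lemma pvLookup_eq (g : List (String × List String)) (hn : (g.map Prod.fst).Nodup)
    (p : String × List String) (hp : p ∈ g) : pvLookup g p.1 = p.2 := by
  induction g with
  | nil => cases hp
  | cons q t ih =>
    simp only [List.map_cons, List.nodup_cons] at hn
    rcases List.mem_cons.mp hp with h | h
    · subst h
      simp [pvLookup]
    · have hne : ¬ (q.1 == p.1) = true := by
        simp only [beq_iff_eq]
        intro he
        exact hn.1 (he ▸ List.mem_map_of_mem h)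
      simpa [pvLookup, List.find?_cons, hne] using ih hn.2 h

lemma genA_domain (g : List (String × List String)) (cutoff bs rm : Int) (last curr : String)
    (urls : List String) (hlook : pvLookup g curr = urls)
    (hstep : 0 < pvStep cutoff bs rm urls) :
    ∀ (m : Nat) (counter : Int), (((urls.length : Int)) - counter).toNat ≤ m →
    ∀ (it : List String) (res : List (Int × Int × String)),
    genA_loop g cutoff bs rm last it curr counter res =
      (if curr == last then res ++ pvSegTuples cutoff bs rm curr urls counter
       else
         match it with
         | [] => res ++ pvSegTuples cutoff bs rm curr urls counter
         | k :: it' => genA_loop g cutoff bs rm last it' k 0 (res ++ pvSegTuples cutoff bs rm curr urls counter)) := by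
  have hS : (if ((urls.length : Int) > cutoff) then bs * rm else bs) = pvStep cutoff bs rm urls := rfl
  intro m
  induction m with
  | zero =>
    intro counter hm it res
    conv_lhs => rw [genA_loop.eq_def]
    simp only [hlook, hS]
    have h1 : counter + pvStep cutoff bs rm urls ≥ ((urls.length : Int)) := by omega
    rw [dif_pos h1]
    have hD : pvSegTuples cutoff bs rm curr urls counter = [(counter, pvStep cutoff bs rm urls, curr)] := by
      unfold pvSegTuples
      rw [pyRange_pos_cons _ _ _ hstep (by omega), pyRange_pos_nil _ _ _ hstep (by omega)]
      simp
    rw [hD]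
  | succ m ih =>
    intro counter hm it res
    conv_lhs => rw [genA_loop.eq_def]
    simp only [hlook, hS]
    by_cases h1 : counter + pvStep cutoff bs rm urls ≥ ((urls.length : Int))
    · rw [dif_pos h1]
      have hD : pvSegTuples cutoff bs rm curr urls counter = [(counter, pvStep cutoff bs rm urls, curr)] := by
        unfold pvSegTuples
        rw [pyRange_pos_cons _ _ _ hstep (by omega), pyRange_pos_nil _ _ _ hstep (by omega)]
        simp
      rw [hD]
    · rw [dif_neg h1, dif_pos hstep]
      rw [ih (counter + pvStep cutoff bs rm urls) (by omega) it (res ++ [(counter, pvStep cutoff bs rm urls, curr)])]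
      have hD : pvSegTuples cutoff bs rm curr urls counter
          = (counter, pvStep cutoff bs rm urls, curr) :: pvSegTuples cutoff bs rm curr urls (counter + pvStep cutoff bs rm urls) := by
        unfold pvSegTuples
        have hM : max ((urls.length : Int)) (counter + 1) = ((urls.length : Int)) := by omega
        have hM' : max ((urls.length : Int)) (counter + pvStep cutoff bs rm urls + 1) = ((urls.length : Int)) := by omega
        rw [hM, hM', pyRange_pos_cons _ _ _ hstep (by omega)]
        simp
      rw [hD]
      cases it <;> simp [List.append_assoc]

lemma getLast!_cons_cons (a b : String) (l : List String) :
    (a :: b :: l).getLast! = (b :: l).getLast! := rfl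

lemma getLast!_mem (a : String) (l : List String) : (a :: l).getLast! ∈ a :: l := by
  induction l generalizing a with
  | nil => simp [List.getLast!]
  | cons b t ih =>
    rw [getLast!_cons_cons]
    exact List.mem_cons_of_mem a (ih b)

lemma genA_run (g : List (String × List String)) (cutoff bs rm : Int) (last : String) :
    ∀ (rest : List (String × List String)) (k : String) (urls : List String),
    (∀ p ∈ (k, urls) :: rest, pvLookup g p.1 = p.2) →
    (∀ p ∈ (k, urls) :: rest, 0 < pvStep cutoff bs rm p.2) →
    ((((k, urls) :: rest).map Prod.fst).getLast! = last) →
    ((((k, urls) :: rest).map Prod.fst).Nodup) →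
    ∀ res, genA_loop g cutoff bs rm last (rest.map Prod.fst) k 0 res
      = res ++ ((k, urls) :: rest).flatMap (fun p => pvSegTuples cutoff bs rm p.1 p.2 0) := by
  intro rest
  induction rest with
  | nil =>
    intro k urls hlk hst hlast hnd res
    have hl : k = last := by simpa using hlast
    simp only [List.map_nil]
    rw [genA_domain g cutoff bs rm last k urls (hlk (k, urls) (by simp)) (hst (k, urls) (by simp))
      urls.length 0 (by omega) [] res]
    simp [hl]
  | cons q t ih =>
    obtain ⟨k2, u2⟩ := q
    intro k urls hlk hst hlast hnd res
    simp only [List.map_cons] at hlast hnd ⊢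
    have hlast' : (k2 :: t.map Prod.fst).getLast! = last := by
      rw [← hlast, getLast!_cons_cons]
    have hk : (k == last) = false := by
      simp only [beq_eq_false_iff_ne, ne_eq]
      intro he
      have hmem : last ∈ k2 :: t.map Prod.fst := hlast' ▸ getLast!_mem k2 (t.map Prod.fst)
      exact (List.nodup_cons.mp hnd).1 (he ▸ hmem)
    rw [genA_domain g cutoff bs rm last k urls (hlk (k, urls) (by simp)) (hst (k, urls) (by simp))
      urls.length 0 (by omega) (k2 :: t.map Prod.fst) res]
    rw [hk]
    show genA_loop g cutoff bs rm last (t.map Prod.fst) k2 0 _ = _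
    rw [ih k2 u2 (fun p hp => hlk p (List.mem_cons_of_mem _ hp))
      (fun p hp => hst p (List.mem_cons_of_mem _ hp))
      (by simpa using hlast') (by simpa using (List.nodup_cons.mp hnd).2)]
    simp [List.append_assoc]

-- B's stage-1 fold produces one spec per domain
lemma genB_specs (cutoff bs rm : Int) :
    ∀ (l : List (String × List String)) (init : List (String × Int × Int)),
    l.foldl
      (fun acc p =>
        let step := if ((p.2.length : Int) > cutoff) then bs * rm else bs
        acc ++ [(p.1, step, max (-(PySem.Int.floordiv (-(p.2.length : Int)) step)) 1)])
      init
      = init ++ l.map (fun p =>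
          (p.1, pvStep cutoff bs rm p.2,
            max (-(PySem.Int.floordiv (-(p.2.length : Int)) (pvStep cutoff bs rm p.2))) 1))
  | [], init => by simp
  | p :: t, init => by
    simp only [List.foldl_cons, List.map_cons]
    rw [genB_specs cutoff bs rm t]
    simp [pvStep, List.append_assoc]

-- expanding one spec equals the stepping segment: the ceiling-division count matches pyRange's length
lemma genB_seg (cutoff bs rm : Int) (d : String) (urls : List String)
    (hs : 0 < pvStep cutoff bs rm urls) :
    (PySem.List.pyRange 0
        (max (-(PySem.Int.floordiv (-(urls.length : Int)) (pvStep cutoff bs rm urls))) 1) 1).map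
      (fun i => (i * pvStep cutoff bs rm urls, pvStep cutoff bs rm urls, d))
      = pvSegTuples cutoff bs rm d urls 0 := by
  set s := pvStep cutoff bs rm urls with hsdef
  set L : Int := (urls.length : Int) with hL
  have hL0 : 0 ≤ L := by positivity
  set c : Int := -(PySem.Int.floordiv (-L) s) with hc
  have hcb : (c - 1) * s < L ∧ L ≤ c * s :=
    (PySem.Int.neg_floordiv_neg_eq_iff_of_pos hs).mp rfl
  unfold pvSegTuples
  rw [← hsdef, ← hL]
  have hB : max L (0 + 1) = max L 1 := by omega
  rw [hB, PySem.List.pyRange_of_pos _ _ hs, PySem.List.pyRange_one]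
  have hcount : (max c 1).toNat = (if (0:Int) < max L 1 then ((max L 1 - 0 + s - 1) / s).toNat else 0) := by
    rw [if_pos (by omega)]
    have hfd : (max L 1 + s - 1) / s = PySem.Int.floordiv (max L 1 + s - 1) s :=
      (PySem.Int.floordiv_eq_ediv_of_pos hs).symm
    have hq : PySem.Int.floordiv (max L 1 + s - 1) s = max c 1 := by
      rw [PySem.Int.floordiv_eq_iff_of_pos hs]
      by_cases h1 : 0 < L
      · -- L ≥ 1: c ≥ 1 and the count is c
        have hc1 : 1 ≤ c := by nlinarith [hcb.2]
        have hm : max L 1 = L := by omega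
        have hmc : max c 1 = c := by omega
        rw [hm, hmc]
        constructor
        · nlinarith [hcb.1]
        · nlinarith [hcb.2]
      · -- L = 0: c = 0 (from the brackets), count is 1
        have hLz : L = 0 := by omega
        have hc0 : c = 0 := by nlinarith [hcb.1, hcb.2]
        have hm : max L 1 = 1 := by omega
        have hmc : max c 1 = 1 := by omega
        rw [hm, hmc]
        constructor <;> nlinarith
    rw [show max L 1 - 0 + s - 1 = max L 1 + s - 1 by ring, hfd, hq]
  rw [← hcount, List.map_map, List.map_map]
  simp only [sub_zero]
  apply List.map_congr_left
  intro k _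
  simp only [Function.comp_apply]
  have hks : (0 + (k : Int)) * s = 0 + s * k := by ring
  rw [hks]

lemma genB_eq (g : List (String × List String)) (cutoff bs rm : Int)
    (hstep : ∀ p ∈ g, 0 < pvStep cutoff bs rm p.2) :
    gen_partition_alt g cutoff bs rm = g.flatMap (fun p => pvSegTuples cutoff bs rm p.1 p.2 0) := by
  unfold gen_partition_alt
  rw [genB_specs cutoff bs rm g []]
  simp only [List.nil_append, List.flatMap_map]
  induction g with
  | nil => simp
  | cons p t ih =>
    simp only [List.flatMap_cons]
    rw [ih (fun q hq => hstep q (List.mem_cons_of_mem _ hq))]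
    rw [genB_seg cutoff bs rm p.1 p.2 (hstep p (by simp))]

-- ===== VERDICT (by name: the statement is the Claim_ definition above) =====
theorem gen_partition_spec : Claim_equal_gen_partition := by
  intro g cutoff batch_size req_multiple _ hpre
  obtain ⟨hne, hnd, hstep⟩ := hpre
  unfold Spec_gen_partition
  rw [genB_eq g cutoff batch_size req_multiple (fun p hp => by simpa [pvStep] using hstep p hp)]
  obtain ⟨⟨k, urls⟩, rest, rfl⟩ : ∃ p t, g = p :: t := by
    cases g with
    | nil => exact absurd rfl hne
    | cons p t => exact ⟨p, t, rfl⟩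
  unfold gen_partition
  simp only [List.isEmpty_cons, List.map_cons, List.head!_cons, List.tail_cons, if_false,
    Bool.false_eq_true]
  rw [genA_run ((k, urls) :: rest) cutoff batch_size req_multiple
    ((k :: rest.map Prod.fst).getLast!) rest k urls
    (fun p hp => pvLookup_eq _ hnd p hp)
    (fun p hp => by simpa [pvStep] using hstep p hp)
    (by simp) (by simpa using hnd) []]
  simp
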